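-- pv_equiv track=rewrite | github.com/markodjukanovic90/VGLCS | src/dp_algorithm_1_improved.py | vglcs_optimized
-- ===== SOURCE A (Python) =====
-- from collections import deque
--
-- def sliding_max(arr, start, end):
--     """Return max over arr[start:end+1] using deque."""
--     dq = deque()
--     for i in range(start, end + 1):
--         while dq and arr[dq[-1]] <= arr[i]:
--             dq.pop()
--         dq.append(i)
--     return arr[dq[0]] if dq else 0
--
-- def vglcs_optimized(A, B, G_A, G_B):
--     n, m = len(A), len(B)
--
--     F = [[0] * (m + 1) for _ in range(n + 1)]
--     V = [[0] * (m + 1) for _ in range(n + 1)]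
--     All = [[0] * (m + 1) for _ in range(n + 1)]
--
--     for i in range(1, n + 1):
--         ga = G_A[i - 1]
--         row_start = max(0, i - ga - 1)
--         row_end = i - 1
--
--         for j in range(1, m + 1):
--             gb = G_B[j - 1]
--             col_start = max(0, j - gb - 1)
--             col_end = j - 1
--
--             # Compute max in rectangle [row_start:row_end][col_start:col_end]
--             max_val = 0
--             for x in range(row_start, row_end + 1):
--                 if col_start <= col_end:
--                     row_max = sliding_max(F[x], col_start, col_end)
--                     max_val = max(max_val, row_max)
--
--             All[i][j] = max_val
--
--             if A[i - 1] == B[j - 1]: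
--                 F[i][j] = 1 + All[i][j]
--                 V[i][j] = max(F[i][j], V[i - 1][j], V[i][j - 1])
--             else:
--                 F[i][j] = 0
--                 V[i][j] = max(V[i - 1][j], V[i][j - 1])
--
--     return V[n][m], V, F
-- ===== SOURCE B (Python) =====
-- def vglcs_optimized(A, B, G_A, G_B):
--     n, m = len(A), len(B)
--
--     # Matrices are built row by row (appended, never mutated in place); the dead
--     # All matrix of the original is not materialised at all.
--     F_rows = [[0] * (m + 1)]
--     V_rows = [[0] * (m + 1)]
--
--     for i in range(1, n + 1):
--         ga = G_A[i - 1]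
--         row_start = max(0, i - ga - 1)
--
--         # Column maxima of F over the row band [row_start, i-1], folded once per i
--         # with elementwise max; every rectangle query of this row is then a single
--         # 1-D window scan over `col`.
--         col = [0] * (m + 1)
--         for x in range(row_start, i):
--             col = [c if c >= f else f for c, f in zip(col, F_rows[x])]
--
--         prev_v = V_rows[-1]
--         f_row = [0]
--         v_row = [0]
--         for j in range(1, m + 1):
--             gb = G_B[j - 1]
--             col_start = max(0, j - gb - 1)
--             w = 0
--             for y in range(col_start, j):
--                 if w < col[y]:
--                     w = col[y]
--             fv = 1 + w if A[i - 1] == B[j - 1] else 0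
--             f_row.append(fv)
--             v_row.append(max(fv, prev_v[j], v_row[-1]))
--         F_rows.append(f_row)
--         V_rows.append(v_row)
--
--     return V_rows[n][m], V_rows, F_rows
-- ===== Notes on version B (the rewrite author's own statement) =====
-- stated objective: faster
-- what changed: B builds the matrices row by row as appended fresh lists instead of mutating preallocated ones, drops the dead All matrix entirely, and replaces A's per-cell deque sliding-max over each band row with column maxima of the band folded once per row (elementwise max) so each cell is a single 1-D window scan; the uniform max(fv, prev, left) replaces A's two branches.
import Mathlib
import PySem

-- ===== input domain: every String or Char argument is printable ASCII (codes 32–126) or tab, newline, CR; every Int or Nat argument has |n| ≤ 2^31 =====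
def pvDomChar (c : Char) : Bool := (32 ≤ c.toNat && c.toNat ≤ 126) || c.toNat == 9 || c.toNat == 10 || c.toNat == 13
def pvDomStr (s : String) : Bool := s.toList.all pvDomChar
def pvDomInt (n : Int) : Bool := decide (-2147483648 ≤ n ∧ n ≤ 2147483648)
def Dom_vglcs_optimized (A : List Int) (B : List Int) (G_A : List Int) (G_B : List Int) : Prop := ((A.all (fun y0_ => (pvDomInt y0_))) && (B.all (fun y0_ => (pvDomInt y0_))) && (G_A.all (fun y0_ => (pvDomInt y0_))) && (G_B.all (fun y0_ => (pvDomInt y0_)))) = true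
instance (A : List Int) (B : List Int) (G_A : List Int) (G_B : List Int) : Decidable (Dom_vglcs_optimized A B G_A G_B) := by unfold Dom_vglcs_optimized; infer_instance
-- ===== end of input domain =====

-- B builds the matrices row by row (appended fresh rows, no in-place cell mutation, no dead
-- All matrix) and answers each rectangle query by folding column maxima of the band once per
-- row plus a 1-D window scan (objective: faster).

-- ===== PORT A =====
-- matrix helpers for A's in-place updates: all row/column indices A uses are nonnegative and
-- in range by construction (loop counters start at 0/1), so .toNat and .getD are exact here.
def pvMget (M : List (List Int)) (x y : Int) : Int :=
  (M.getD x.toNat []).getD y.toNat 0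

def pvMset (M : List (List Int)) (x y : Int) (v : Int) : List (List Int) :=
  M.set x.toNat ((M.getD x.toNat []).set y.toNat v)

-- [[0] * (m) for _ in range(n)]
def pvZeros (n m : Nat) : List (List Int) :=
  List.replicate n (List.replicate m (0 : Int))

-- sliding_max: the deque is kept REVERSED (our list head = Python's dq[-1]); the pop-while
-- loop is dropWhile on that head, dq.append is cons, and Python's dq[0] is our getLast.
def slidingMax (arr : List Int) (start stop : Int) : Int :=
  let dq := (PySem.List.pyRange start (stop + 1)).foldl
      (fun dq i => i :: dq.dropWhile (fun k => arr.getD k.toNat 0 ≤ arr.getD i.toNat 0)) []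
  match dq.getLast? with
  | some k => arr.getD k.toNat 0     -- arr[dq[0]]
  | none => 0                        -- empty range

-- body of A's inner j-loop (state = (F, V, All))
def stepA_j (Apy Bpy G_B : List Int) (i rowStart rowEnd : Int)
    (st : List (List Int) × List (List Int) × List (List Int)) (j : Int) :
    List (List Int) × List (List Int) × List (List Int) :=
  let F := st.1; let V := st.2.1; let All := st.2.2
  let gb := G_B.getD (j - 1).toNat 0
  let colStart := max 0 (j - gb - 1)
  let colEnd := j - 1
  let maxVal := (PySem.List.pyRange rowStart (rowEnd + 1)).foldl
      (fun mv x => if colStart ≤ colEnd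
                   then max mv (slidingMax (F.getD x.toNat []) colStart colEnd)
                   else mv) 0
  let All' := pvMset All i j maxVal
  if Apy.getD (i - 1).toNat 0 = Bpy.getD (j - 1).toNat 0 then
    let fv := 1 + maxVal             -- F[i][j] = 1 + All[i][j], the value just stored
    (pvMset F i j fv,
     pvMset V i j (max (max fv (pvMget V (i - 1) j)) (pvMget V i (j - 1))), All')
  else
    (pvMset F i j 0,
     pvMset V i j (max (pvMget V (i - 1) j) (pvMget V i (j - 1))), All')

-- body of A's outer i-loop
def stepA_i (Apy Bpy G_A G_B : List Int) (m : Int)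
    (st : List (List Int) × List (List Int) × List (List Int)) (i : Int) :
    List (List Int) × List (List Int) × List (List Int) :=
  let ga := G_A.getD (i - 1).toNat 0
  let rowStart := max 0 (i - ga - 1)
  let rowEnd := i - 1
  (PySem.List.pyRange 1 (m + 1)).foldl (stepA_j Apy Bpy G_B i rowStart rowEnd) st

def vglcs_optimized (A : List Int) (B : List Int) (G_A : List Int) (G_B : List Int) :
    Int × List (List Int) × List (List Int) :=
  let n : Int := A.length
  let m : Int := B.length
  let init := (pvZeros (A.length + 1) (B.length + 1),
               pvZeros (A.length + 1) (B.length + 1),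
               pvZeros (A.length + 1) (B.length + 1))
  let fin := (PySem.List.pyRange 1 (n + 1)).foldl (stepA_i A B G_A G_B m) init
  (pvMget fin.2.1 n m, fin.2.1, fin.1)

-- ===== PORT B =====
-- col = [c if c >= f else f for c, f in zip(col, fr)]
def pvColMax (col fr : List Int) : List Int :=
  List.zipWith (fun c f => if f ≤ c then c else f) col fr

-- w = 0; for y in range(cs, j): if w < col[y]: w = col[y]
def pvWinMax (col : List Int) (cs j : Int) : Int :=
  (PySem.List.pyRange cs j).foldl
    (fun w y => if w < col.getD y.toNat 0 then col.getD y.toNat 0 else w) 0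

-- body of B's inner j-loop; state = the (f_row, v_row) being appended to
def stepB_j (Apy Bpy G_B prevV col : List Int) (i : Int)
    (rows : List Int × List Int) (j : Int) : List Int × List Int :=
  let gb := G_B.getD (j - 1).toNat 0
  let cs := max 0 (j - gb - 1)
  let w := pvWinMax col cs j
  let fv := if Apy.getD (i - 1).toNat 0 = Bpy.getD (j - 1).toNat 0 then 1 + w else 0
  (rows.1 ++ [fv],
   rows.2 ++ [max (max fv (prevV.getD j.toNat 0)) (rows.2.getLastD 0)])

-- body of B's outer i-loop: fold the band's column maxima once, build the two new rows, append
def stepB_i (Apy Bpy G_A G_B : List Int) (m : Int)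
    (st : List (List Int) × List (List Int)) (i : Int) :
    List (List Int) × List (List Int) :=
  let ga := G_A.getD (i - 1).toNat 0
  let rowStart := max 0 (i - ga - 1)
  let col := (PySem.List.pyRange rowStart i).foldl
      (fun c x => pvColMax c (st.1.getD x.toNat [])) (List.replicate (m.toNat + 1) 0)
  let prevV := st.2.getLastD []
  let rows := (PySem.List.pyRange 1 (m + 1)).foldl (stepB_j Apy Bpy G_B prevV col i) ([0], [0])
  (st.1 ++ [rows.1], st.2 ++ [rows.2])

def vglcs_optimized_alt (A : List Int) (B : List Int) (G_A : List Int) (G_B : List Int) :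
    Int × List (List Int) × List (List Int) :=
  let n : Int := A.length
  let m : Int := B.length
  let fin := (PySem.List.pyRange 1 (n + 1)).foldl (stepB_i A B G_A G_B m)
      ([List.replicate (B.length + 1) (0 : Int)], [List.replicate (B.length + 1) (0 : Int)])
  ((fin.2.getD n.toNat []).getD m.toNat 0, fin.2, fin.1)

-- ===== PRECONDITION & SPEC =====
-- Pre_ excludes exactly the inputs where the Python raises IndexError: G_A shorter than A
-- (read whenever A is nonempty) or G_B shorter than B (read whenever A and B are nonempty).
def Pre_vglcs_optimized (A : List Int) (B : List Int) (G_A : List Int) (G_B : List Int) : Prop :=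
  (A = [] ∨ A.length ≤ G_A.length) ∧ (A = [] ∨ B = [] ∨ B.length ≤ G_B.length)
instance (A : List Int) (B : List Int) (G_A : List Int) (G_B : List Int) : Decidable (Pre_vglcs_optimized A B G_A G_B) := by unfold Pre_vglcs_optimized; infer_instance

def pvWitness_vglcs_optimized : List Int × List Int × List Int × List Int := ([1], [1], [5], [5])

def Spec_vglcs_optimized (A : List Int) (B : List Int) (G_A : List Int) (G_B : List Int) (out : Int × List (List Int) × List (List Int)) : Prop := out = vglcs_optimized_alt A B G_A G_B
instance (A : List Int) (B : List Int) (G_A : List Int) (G_B : List Int) (out : Int × List (List Int) × List (List Int)) : Decidable (Spec_vglcs_optimized A B G_A G_B out) := by unfold Spec_vglcs_optimized; infer_instance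

-- ===== CLAIM (what is proved, stated in full; the proofs are below) =====
def Claim_equal_vglcs_optimized : Prop := ∀ (A : List Int) (B : List Int) (G_A : List Int) (G_B : List Int), Dom_vglcs_optimized A B G_A G_B → Pre_vglcs_optimized A B G_A G_B → Spec_vglcs_optimized A B G_A G_B (vglcs_optimized A B G_A G_B)

-- ===== LEMMAS AND PROOFS =====

-- `bm l` = running max of l with floor 0
def bm (l : List Int) : Int := l.foldl max 0

lemma bm_cons (a : Int) (l : List Int) : bm (a :: l) = max a (bm l) := by
  simp only [bm, List.foldl_cons]
  rw [max_comm 0 a, List.foldl_assoc]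

lemma bm_nonneg (l : List Int) : 0 ≤ bm l := (PySem.List.le_foldl_max l 0).1

lemma foldl_max_of_nonneg (a : Int) (t : List Int) (ha : 0 ≤ a) :
    t.foldl max a = max a (bm t) := by
  have h := List.foldl_assoc (op := max) (l := t) (a₁ := a) (a₂ := 0)
  rw [max_eq_left ha] at h
  exact h

lemma bm_split (l : List Int) (p q : Int → Int) :
    bm (l.map fun y => max (p y) (q y)) = max (bm (l.map p)) (bm (l.map q)) := by
  induction l with
  | nil => simp [bm]
  | cons y ys ih =>
    simp only [List.map_cons, bm_cons, ih]
    exact max_max_max_comm _ _ _ _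

lemma bm_const0 {α : Type} (l : List α) : bm (l.map fun _ => (0 : Int)) = 0 := by
  induction l with
  | nil => simp [bm]
  | cons y ys ih =>
    rw [List.map_cons, bm_cons, ih]
    simp

-- exchanging the two directions of a rectangle max (both with floor 0)
lemma bm_interchange (rows cols : List Int) (g : Int → Int → Int) :
    bm (rows.map fun x => bm (cols.map fun y => g x y))
      = bm (cols.map fun y => bm (rows.map fun x => g x y)) := by
  induction rows with
  | nil =>
    show bm ([] : List Int) = _
    change (0 : Int) = bm (cols.map fun _ => (0 : Int))
    rw [bm_const0]
  | cons x xs ih =>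
    simp only [List.map_cons, bm_cons, ih]
    exact (bm_split cols _ _).symm

-- ---- the deque of sliding_max computes the max of the processed values ----
def dqStep (f : Int → Int) (dq : List Int) (i : Int) : List Int :=
  i :: dq.dropWhile (fun k => f k ≤ f i)

-- max? of a nonempty list of Ints, in the foldl normal form used below
def m? (l : List Int) : Option Int :=
  match l with
  | [] => none
  | a :: t => some (t.foldl max a)

lemma m?_concat (l : List Int) (a : Int) :
    m? (l ++ [a]) = some ((m? l).elim a (fun M => max M a)) := by
  cases l with
  | nil => simp [m?]
  | cons b t => simp [m?, List.foldl_append]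

lemma dq_spec (f : Int → Int) (l : List Int) :
    ((l.foldl (dqStep f) []).getLast?).map f = m? (l.map f)
    ∧ ∀ k ∈ l.foldl (dqStep f) [], ∀ g, (l.foldl (dqStep f) []).getLast? = some g → f k ≤ f g := by
  induction l using List.reverseRecOn with
  | nil => simp [m?]
  | append_singleton l a ih =>
    rw [List.foldl_append]
    simp only [List.foldl_cons, List.foldl_nil, List.map_append, List.map_cons, List.map_nil]
    rw [m?_concat]
    show ((dqStep f (l.foldl (dqStep f) []) a).getLast?).map f = _ ∧ _
    set S := l.foldl (dqStep f) [] with hS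
    set p : Int → Bool := fun k => f k ≤ f a with hp
    cases hdw : S.dropWhile p with
    | nil =>
      have hall : ∀ k ∈ S, p k = true := List.dropWhile_eq_nil_iff.mp hdw
      have hnew : dqStep f S a = [a] := by simp [dqStep, ← hp, hdw]
      constructor
      · rw [hnew]
        simp only [List.getLast?_singleton, Option.map_some]
        cases hSl : S.getLast? with
        | none =>
          have : S = [] := List.getLast?_eq_none_iff.mp hSl
          have hm : m? (l.map f) = none := by
            rw [← ih.1, hSl]; rfl
          rw [hm]; rfl
        | some g =>
          have hm : m? (l.map f) = some (f g) := by rw [← ih.1, hSl]; rfl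
          have hg : g ∈ S := List.mem_of_getLast? hSl
          have : f g ≤ f a := by
            have := hall g hg
            simpa [hp] using this
          rw [hm]
          simp [Option.elim, max_eq_right this]
      · intro k hk g hg
        rw [hnew] at hk hg
        simp only [List.mem_singleton] at hk
        simp only [List.getLast?_singleton, Option.some.injEq] at hg
        subst hk; subst hg; exact le_refl _
    | cons b t =>
      have hsuf : b :: t <:+ S := hdw ▸ List.dropWhile_suffix p
      have hbS : b ∈ S := hsuf.mem List.mem_cons_self
      have hSne : S ≠ [] := by
        intro h; rw [h] at hdw; simp at hdw
      obtain ⟨g, hSl⟩ : ∃ g, S.getLast? = some g := by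
        cases h : S.getLast? with
        | none => exact absurd (List.getLast?_eq_none_iff.mp h) hSne
        | some g => exact ⟨g, rfl⟩
      have hm : m? (l.map f) = some (f g) := by rw [← ih.1, hSl]; rfl
      have hbf : ¬ (f b ≤ f a) := by
        have hh := List.head?_dropWhile_not p S
        rw [hdw] at hh
        simp only [List.head?_cons] at hh
        simpa [hp] using hh
      have hba : f a < f b := lt_of_not_ge hbf
      have hbg : f b ≤ f g := ih.2 b hbS g hSl
      have hnewLast : (dqStep f S a).getLast? = some g := by
        have h1 : dqStep f S a = a :: (b :: t) := by simp [dqStep, ← hp, hdw]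
        have h2 : (b :: t).getLast? = S.getLast? := by
          obtain ⟨pre, hpre⟩ := hsuf
          rw [← hpre, List.getLast?_append]
          cases h : (b :: t).getLast? with
          | none => exact absurd (List.getLast?_eq_none_iff.mp h) (by simp)
          | some w => rfl
        rw [h1, List.getLast?_cons_cons, h2, hSl]
      constructor
      · rw [hnewLast, hm]
        simp only [Option.map_some, Option.elim]
        have : max (f g) (f a) = f g := max_eq_left (le_trans (le_of_lt hba) hbg)
        rw [this]
      · intro k hk g' hg'
        rw [hnewLast, Option.some.injEq] at hg'
        subst hg'
        have h1 : dqStep f S a = a :: (b :: t) := by simp [dqStep, ← hp, hdw]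
        rw [h1] at hk
        rcases List.mem_cons.mp hk with h | h
        · subst h; exact le_trans (le_of_lt hba) hbg
        · exact ih.2 k (hsuf.mem h) g hSl

lemma slidingMax_eq (arr : List Int) (s e : Int) :
    slidingMax arr s e
      = (m? ((PySem.List.pyRange s (e + 1)).map (fun k => arr.getD k.toNat 0))).getD 0 := by
  have h := (dq_spec (fun k => arr.getD k.toNat 0) (PySem.List.pyRange s (e + 1))).1
  show (match ((PySem.List.pyRange s (e + 1)).foldl
      (dqStep (fun k => arr.getD k.toNat 0)) []).getLast? with
    | some k => arr.getD k.toNat 0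
    | none => 0) = _
  cases hdq : ((PySem.List.pyRange s (e + 1)).foldl
      (dqStep (fun k => arr.getD k.toNat 0)) []).getLast? with
  | none =>
    rw [hdq] at h
    simp only [Option.map_none] at h
    rw [← h]
    rfl
  | some k =>
    rw [hdq] at h
    simp only [Option.map_some] at h
    rw [← h]
    rfl

lemma m?_getD_eq_bm (l : List Int) (h : ∀ a ∈ l, 0 ≤ a) : (m? l).getD 0 = bm l := by
  cases l with
  | nil => simp [m?, bm]
  | cons a t =>
    simp only [m?, Option.getD_some, bm_cons]
    exact foldl_max_of_nonneg a t (h a List.mem_cons_self)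

lemma getD_nonneg (r : List Int) (h : ∀ v ∈ r, 0 ≤ v) (k : Nat) : 0 ≤ r.getD k 0 := by
  rw [List.getD_eq_getElem?_getD]
  cases hk : r[k]? with
  | none => simp
  | some v => simpa using h v (List.mem_of_getElem? hk)

-- ---- list plumbing ----
lemma getD_append_left {α : Type} (l1 l2 : List α) (d : α) (x : Nat) (h : x < l1.length) :
    (l1 ++ l2).getD x d = l1.getD x d := by
  simp [List.getD_eq_getElem?_getD, List.getElem?_append_left h]

lemma getD_append_cons {α : Type} (l1 : List α) (a : α) (l2 : List α) (d : α) :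
    (l1 ++ a :: l2).getD l1.length d = a := by
  induction l1 with
  | nil => rfl
  | cons b t ih => simp only [List.cons_append, List.length_cons, List.getD_cons_succ]; exact ih

lemma set_append_len {α : Type} (l : List α) (a v : α) (rest : List α) :
    (l ++ a :: rest).set l.length v = l ++ v :: rest := by
  induction l with
  | nil => rfl
  | cons b t ih => simp [ih]

lemma getD_append_mid {α : Type} (l1 : List α) (a : α) (l2 : List α) (d : α) (x : Nat)
    (h : x < l1.length) : (l1 ++ a :: l2).getD x d = l1.getD x d :=
  getD_append_left l1 (a :: l2) d x h

lemma getLastD_eq_getD {α : Type} (l : List α) (d : α) (h : l ≠ []) :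
    l.getLastD d = l.getD (l.length - 1) d := by
  induction l with
  | nil => exact absurd rfl h
  | cons a t ih =>
    cases t with
    | nil => rfl
    | cons b u =>
      have := ih (by simp)
      simp only [List.getLastD_cons] at this ⊢
      rw [this]
      rfl

-- ---- B's column-maxima fold, pointwise ----
lemma colMax_getD (c f : List Int) (y : Nat) (hc : y < c.length) (hf : y < f.length) :
    (pvColMax c f).getD y 0 = max (c.getD y 0) (f.getD y 0) := by
  unfold pvColMax
  have hy : y < (List.zipWith (fun c f => if f ≤ c then c else f) c f).length := by
    rw [List.length_zipWith]; omega
  rw [List.getD_eq_getElem _ _ hy, List.getElem_zipWith,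
      List.getD_eq_getElem _ _ hc, List.getD_eq_getElem _ _ hf]
  split_ifs with h
  · rw [max_eq_left h]
  · rw [max_eq_right (le_of_not_ge h)]

lemma colfold_aux (Fr : List (List Int)) (m y : Nat) (hy : y < m + 1) :
    ∀ (l : List Int), (∀ x ∈ l, (Fr.getD x.toNat []).length = m + 1) →
    ∀ (col : List Int), col.length = m + 1 →
      (l.foldl (fun c x => pvColMax c (Fr.getD x.toNat [])) col).length = m + 1 ∧
      (l.foldl (fun c x => pvColMax c (Fr.getD x.toNat [])) col).getD y 0
        = (l.map (fun x => (Fr.getD x.toNat []).getD y 0)).foldl max (col.getD y 0) := by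
  intro l
  induction l with
  | nil => intro _ col hcol; exact ⟨hcol, rfl⟩
  | cons x xs ih =>
    intro hlen col hcol
    have hx := hlen x List.mem_cons_self
    have hlen' : (pvColMax col (Fr.getD x.toNat [])).length = m + 1 := by
      unfold pvColMax; rw [List.length_zipWith]; omega
    have hres := ih (fun x' hx' => hlen x' (List.mem_cons_of_mem _ hx'))
        (pvColMax col (Fr.getD x.toNat [])) hlen'
    refine ⟨hres.1, ?_⟩
    simp only [List.foldl_cons, List.map_cons]
    rw [hres.2, colMax_getD _ _ y (by omega) (by omega)]

lemma colfold_getD (Fr : List (List Int)) (l : List Int) (m y : Nat)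
    (hrows : ∀ x ∈ l, (Fr.getD x.toNat []).length = m + 1) (hy : y < m + 1) :
    (l.foldl (fun c x => pvColMax c (Fr.getD x.toNat [])) (List.replicate (m + 1) 0)).getD y 0
      = bm (l.map (fun x => (Fr.getD x.toNat []).getD y 0)) := by
  have h := (colfold_aux Fr m y hy l hrows (List.replicate (m + 1) 0) (by simp)).2
  rw [h]
  have h0 : (List.replicate (m + 1) (0 : Int)).getD y 0 = 0 := by
    rw [List.getD_eq_getElem _ _ (by simpa using hy)]; simp
  rw [h0, bm, List.foldl_map]

-- ---- B's window scan is the running max ----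
lemma winMax_eq (col : List Int) (cs j : Int) :
    pvWinMax col cs j = bm ((PySem.List.pyRange cs j).map (fun y => col.getD y.toNat 0)) := by
  unfold pvWinMax bm
  rw [List.foldl_map]
  apply PySem.List.foldl_congr_mem
  intro acc y _
  by_cases h : acc < col.getD y.toNat 0
  · rw [if_pos h, max_eq_right (le_of_lt h)]
  · rw [if_neg h, max_eq_left (le_of_not_gt h)]

-- ---- row/matrix well-formedness ----
def RowOk (m : Nat) (r : List Int) : Prop := r.length = m + 1 ∧ ∀ v ∈ r, 0 ≤ v

def MatOk (m : Nat) (M : List (List Int)) : Prop := ∀ r ∈ M, RowOk m r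

lemma MatOk_getD {m : Nat} {M : List (List Int)} (h : MatOk m M) (x : Nat)
    (hx : x < M.length) : RowOk m (M.getD x []) := by
  rw [List.getD_eq_getElem _ _ hx]
  exact h _ (List.getElem_mem hx)

-- ---- the per-cell equality: A's guarded per-row deque scan over the rectangle equals
-- B's window scan over the folded column maxima ----
lemma cellB_eq (F : List (List Int)) (m : Nat) (rs i cs j : Int)
    (hrows : ∀ x ∈ PySem.List.pyRange rs i, RowOk m (F.getD x.toNat []))
    (hcs : 0 ≤ cs) (hj1 : 1 ≤ j) (hjm : j ≤ (m : Int)) :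
    (PySem.List.pyRange rs ((i - 1) + 1)).foldl
        (fun mv x => if cs ≤ j - 1
                     then max mv (slidingMax (F.getD x.toNat []) cs (j - 1))
                     else mv) 0
      = pvWinMax ((PySem.List.pyRange rs i).foldl
          (fun c x => pvColMax c (F.getD x.toNat [])) (List.replicate (m + 1) 0)) cs j := by
  have hi1 : (i - 1) + 1 = i := by ring
  rw [hi1]
  by_cases hguard : cs ≤ j - 1
  · simp only [if_pos hguard]
    have hA : (PySem.List.pyRange rs i).foldl
        (fun mv x => max mv (slidingMax (F.getD x.toNat []) cs (j - 1))) 0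
        = bm ((PySem.List.pyRange rs i).map
            (fun x => bm ((PySem.List.pyRange cs j).map
              (fun y => (F.getD x.toNat []).getD y.toNat 0)))) := by
      rw [bm, List.foldl_map]
      apply PySem.List.foldl_congr_mem
      intro acc x hx
      congr 1
      rw [slidingMax_eq]
      have hj1' : (j - 1) + 1 = j := by ring
      rw [hj1', m?_getD_eq_bm]
      intro a ha
      obtain ⟨y, _, rfl⟩ := List.mem_map.mp ha
      exact getD_nonneg _ (hrows x hx).2 _
    rw [hA, bm_interchange, winMax_eq]
    congr 1
    apply List.map_congr_left
    intro y hy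
    obtain ⟨hy1, hy2⟩ := PySem.List.mem_pyRange_one.mp hy
    have hy0 : 0 ≤ y := le_trans hcs hy1
    have hyn : y.toNat < m + 1 := by omega
    rw [colfold_getD F _ m y.toNat (fun x hx => (hrows x hx).1) hyn]
  · simp only [if_neg hguard]
    rw [List.foldl_fixed]
    have hnil : PySem.List.pyRange cs j = [] := PySem.List.pyRange_one_eq_nil (by omega)
    simp [pvWinMax, hnil]

-- ---- the relational invariants between A's mutable state and B's appended rows ----
def InnerRel (n m k : Nat) (FrP VrP : List (List Int))
    (stA : List (List Int) × List (List Int) × List (List Int))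
    (rows : List Int × List Int) (t : Nat) : Prop :=
  stA.1 = FrP ++ (rows.1 ++ List.replicate (m - t) 0)
            :: List.replicate (n - (k + 1)) (List.replicate (m + 1) 0)
  ∧ stA.2.1 = VrP ++ (rows.2 ++ List.replicate (m - t) 0)
            :: List.replicate (n - (k + 1)) (List.replicate (m + 1) 0)
  ∧ rows.1.length = t + 1 ∧ rows.2.length = t + 1
  ∧ (∀ v ∈ rows.1, 0 ≤ v) ∧ (∀ v ∈ rows.2, 0 ≤ v)

def OuterRel (n m : Nat) (stA : List (List Int) × List (List Int) × List (List Int))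
    (stB : List (List Int) × List (List Int)) (k : Nat) : Prop :=
  stA.1 = stB.1 ++ List.replicate (n - k) (List.replicate (m + 1) 0)
  ∧ stA.2.1 = stB.2 ++ List.replicate (n - k) (List.replicate (m + 1) 0)
  ∧ stB.1.length = k + 1 ∧ stB.2.length = k + 1
  ∧ MatOk m stB.1 ∧ MatOk m stB.2

lemma inner_step (Apy Bpy G_B : List Int) (n m k : Nat) (FrP VrP : List (List Int))
    (col : List Int) (rs : Int)
    (hFrP : MatOk m FrP) (hVok : MatOk m VrP)
    (hFlen : FrP.length = k + 1) (hVlen : VrP.length = k + 1)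
    (hcol : col = (PySem.List.pyRange rs ((k : Int) + 1)).foldl
        (fun c x => pvColMax c (FrP.getD x.toNat [])) (List.replicate (m + 1) 0))
    (hrs : 0 ≤ rs)
    (t : Nat) (ht : t < m)
    (stA : List (List Int) × List (List Int) × List (List Int)) (rows : List Int × List Int)
    (hrel : InnerRel n m k FrP VrP stA rows t) :
    InnerRel n m k FrP VrP
      (stepA_j Apy Bpy G_B ((k : Int) + 1) rs (((k : Int) + 1) - 1) stA ((t : Int) + 1))
      (stepB_j Apy Bpy G_B (VrP.getLastD []) col ((k : Int) + 1) rows ((t : Int) + 1)) (t + 1) := by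
  obtain ⟨hF, hV, hfl, hvl, hfn, hvn⟩ := hrel
  have hVne : VrP ≠ [] := by intro h; rw [h] at hVlen; simp at hVlen
  have hvne : rows.2 ≠ [] := by intro h; rw [h] at hvl; simp at hvl
  unfold stepA_j stepB_j
  simp only []
  set j : Int := (t : Int) + 1 with hjdef
  set cs : Int := max 0 (j - (G_B.getD (j - 1).toNat 0) - 1) with hcsdef
  -- A's rectangle max equals B's window scan over the folded column maxima
  have hrows : ∀ x ∈ PySem.List.pyRange rs ((k : Int) + 1), RowOk m (FrP.getD x.toNat []) := by
    intro x hx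
    obtain ⟨hx1, hx2⟩ := PySem.List.mem_pyRange_one.mp hx
    exact MatOk_getD hFrP x.toNat (by omega)
  have hcongr : (PySem.List.pyRange rs ((((k : Int) + 1) - 1) + 1)).foldl
      (fun mv x => if cs ≤ j - 1
                   then max mv (slidingMax (stA.1.getD x.toNat []) cs (j - 1)) else mv) 0
      = (PySem.List.pyRange rs ((((k : Int) + 1) - 1) + 1)).foldl
      (fun mv x => if cs ≤ j - 1
                   then max mv (slidingMax (FrP.getD x.toNat []) cs (j - 1)) else mv) 0 := by
    apply PySem.List.foldl_congr_mem
    intro acc x hx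
    obtain ⟨hx1, hx2⟩ := PySem.List.mem_pyRange_one.mp hx
    have hxk : x.toNat < FrP.length := by omega
    rw [hF, getD_append_mid _ _ _ _ _ hxk]
  have hmax : (PySem.List.pyRange rs ((((k : Int) + 1) - 1) + 1)).foldl
      (fun mv x => if cs ≤ j - 1
                   then max mv (slidingMax (stA.1.getD x.toNat []) cs (j - 1)) else mv) 0
      = pvWinMax col cs j := by
    rw [hcongr, hcol]
    exact cellB_eq FrP m rs ((k : Int) + 1) cs j hrows (le_max_left _ _) (by omega) (by omega)
  -- the two reads from V
  have hprev : stA.2.1.getD (((k : Int) + 1) - 1).toNat [] = VrP.getLastD [] := by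
    rw [hV]
    have h1 : (((k : Int) + 1) - 1).toNat = k := by omega
    rw [h1, getD_append_mid _ _ _ _ _ (by omega : k < VrP.length)]
    rw [getLastD_eq_getD VrP [] hVne, hVlen]
    simp
  have hlast2 : rows.2.getLastD 0 = rows.2.getD t 0 := by
    rw [getLastD_eq_getD _ _ hvne, hvl]
    simp
  have hleft : (stA.2.1.getD ((k : Int) + 1).toNat []).getD (j - 1).toNat 0
      = rows.2.getLastD 0 := by
    rw [hV]
    have h1 : ((k : Int) + 1).toNat = VrP.length := by omega
    have h2 : (j - 1).toNat = t := by omega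
    rw [h1, getD_append_cons, h2, getD_append_left _ _ _ _ (by omega : t < rows.2.length), hlast2]
  -- writing position j in the padded current rows = appending to B's rows
  have hrepl : List.replicate (m - t) (0 : Int) = 0 :: List.replicate (m - (t + 1)) 0 := by
    have h : m - t = (m - (t + 1)) + 1 := by omega
    rw [h, List.replicate_succ]
  have hrow1 : ∀ v : Int, (rows.1 ++ List.replicate (m - t) 0).set j.toNat v
      = (rows.1 ++ [v]) ++ List.replicate (m - (t + 1)) 0 := by
    intro v
    rw [hrepl]
    have hj2 : j.toNat = rows.1.length := by omega
    rw [hj2, set_append_len]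
    simp [List.append_assoc]
  have hrow2 : ∀ v : Int, (rows.2 ++ List.replicate (m - t) 0).set j.toNat v
      = (rows.2 ++ [v]) ++ List.replicate (m - (t + 1)) 0 := by
    intro v
    rw [hrepl]
    have hj2 : j.toNat = rows.2.length := by omega
    rw [hj2, set_append_len]
    simp [List.append_assoc]
  have hsetF : ∀ v : Int, pvMset stA.1 ((k : Int) + 1) j v
      = FrP ++ ((rows.1 ++ [v]) ++ List.replicate (m - (t + 1)) 0)
          :: List.replicate (n - (k + 1)) (List.replicate (m + 1) 0) := by
    intro v
    unfold pvMset
    rw [hF]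
    have h1 : ((k : Int) + 1).toNat = FrP.length := by omega
    rw [h1, getD_append_cons, set_append_len, hrow1]
  have hsetV : ∀ v : Int, pvMset stA.2.1 ((k : Int) + 1) j v
      = VrP ++ ((rows.2 ++ [v]) ++ List.replicate (m - (t + 1)) 0)
          :: List.replicate (n - (k + 1)) (List.replicate (m + 1) 0) := by
    intro v
    unfold pvMset
    rw [hV]
    have h1 : ((k : Int) + 1).toNat = VrP.length := by omega
    rw [h1, getD_append_cons, set_append_len, hrow2]
  have hwnn : 0 ≤ pvWinMax col cs j := by
    rw [winMax_eq]; exact bm_nonneg _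
  rw [hmax]
  by_cases hm : Apy.getD (((k : Int) + 1) - 1).toNat 0 = Bpy.getD (j - 1).toNat 0
  · rw [if_pos hm, if_pos hm]
    unfold pvMget
    rw [hprev, hleft, hsetF, hsetV]
    refine ⟨rfl, rfl, by simp [hfl], by simp [hvl], ?_, ?_⟩
    · intro v hv
      rcases List.mem_append.mp hv with h | h
      · exact hfn v h
      · simp only [List.mem_singleton] at h; subst h; omega
    · intro v hv
      rcases List.mem_append.mp hv with h | h
      · exact hvn v h
      · simp only [List.mem_singleton] at h; subst h
        have : (0:Int) ≤ 1 + pvWinMax col cs j := by omega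
        exact le_trans (le_trans this (le_max_left _ _)) (le_max_left _ _)
  · rw [if_neg hm, if_neg hm]
    unfold pvMget
    rw [hprev, hleft, hsetF, hsetV]
    have hpnn : 0 ≤ (VrP.getLastD []).getD j.toNat 0 := by
      apply getD_nonneg
      have hmem : VrP.getLastD [] ∈ VrP ∨ VrP.getLastD [] = ([] : List Int) := by
        cases hvp : VrP with
        | nil => exact Or.inr (by simp)
        | cons a u =>
          left
          rw [getLastD_eq_getD _ _ (by simp), List.getD_eq_getElem _ _ (by simp)]
          exact List.getElem_mem _
      rcases hmem with h | h
      · exact (hVok _ h).2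
      · rw [h]; intro v hv; simp at hv
    have hmax0 : max ((VrP.getLastD []).getD j.toNat 0) (rows.2.getLastD 0)
        = max (max 0 ((VrP.getLastD []).getD j.toNat 0)) (rows.2.getLastD 0) := by
      rw [max_eq_right hpnn]
    rw [hmax0]
    refine ⟨rfl, rfl, by simp [hfl], by simp [hvl], ?_, ?_⟩
    · intro v hv
      rcases List.mem_append.mp hv with h | h
      · exact hfn v h
      · simp only [List.mem_singleton] at h; subst h; omega
    · intro v hv
      rcases List.mem_append.mp hv with h | h
      · exact hvn v h
      · simp only [List.mem_singleton] at h; subst h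
        exact le_trans (le_trans hpnn (le_max_right _ _)) (le_max_left _ _)

lemma inner_fold (Apy Bpy G_B : List Int) (n m k : Nat) (FrP VrP : List (List Int))
    (col : List Int) (rs : Int)
    (hFrP : MatOk m FrP) (hVok : MatOk m VrP)
    (hFlen : FrP.length = k + 1) (hVlen : VrP.length = k + 1)
    (hcol : col = (PySem.List.pyRange rs ((k : Int) + 1)).foldl
        (fun c x => pvColMax c (FrP.getD x.toNat [])) (List.replicate (m + 1) 0))
    (hrs : 0 ≤ rs)
    (stA0 : List (List Int) × List (List Int) × List (List Int))
    (h0 : InnerRel n m k FrP VrP stA0 ([0], [0]) 0) :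
    ∀ t : Nat, t ≤ m →
      InnerRel n m k FrP VrP
        ((PySem.List.pyRange 1 ((t : Int) + 1)).foldl
          (stepA_j Apy Bpy G_B ((k : Int) + 1) rs (((k : Int) + 1) - 1)) stA0)
        ((PySem.List.pyRange 1 ((t : Int) + 1)).foldl
          (stepB_j Apy Bpy G_B (VrP.getLastD []) col ((k : Int) + 1)) ([0], [0])) t := by
  intro t
  induction t with
  | zero =>
    intro _
    rw [PySem.List.pyRange_one_eq_nil (by omega)]
    exact h0
  | succ t ih =>
    intro htm
    have hcast : ((t + 1 : Nat) : Int) + 1 = ((t : Int) + 1) + 1 := by push_cast; ring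
    rw [hcast, PySem.List.pyRange_one_succ_right (by omega), List.foldl_append,
        List.foldl_cons, List.foldl_nil, List.foldl_append, List.foldl_cons, List.foldl_nil]
    exact inner_step Apy Bpy G_B n m k FrP VrP col rs hFrP hVok hFlen hVlen hcol hrs t
      (by omega) _ _ (ih (by omega))

lemma outer_step (Apy Bpy G_A G_B : List Int) (n m k : Nat) (hk : k < n)
    (stA : List (List Int) × List (List Int) × List (List Int))
    (stB : List (List Int) × List (List Int))
    (h : OuterRel n m stA stB k) :
    OuterRel n m (stepA_i Apy Bpy G_A G_B (m : Int) stA ((k : Int) + 1))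
      (stepB_i Apy Bpy G_A G_B (m : Int) stB ((k : Int) + 1)) (k + 1) := by
  obtain ⟨hF, hV, hFlen, hVlen, hFok, hVok⟩ := h
  unfold stepA_i stepB_i
  simp only []
  set rs : Int := max 0 (((k : Int) + 1) - (G_A.getD (((k : Int) + 1) - 1).toNat 0) - 1) with hrsdef
  have hmt : ((m : Int)).toNat = m := Int.toNat_natCast m
  rw [hmt]
  have h0 : InnerRel n m k stB.1 stB.2 stA ([0], [0]) 0 := by
    have hzr : [(0 : Int)] ++ List.replicate (m - 0) 0 = List.replicate (m + 1) 0 := by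
      rw [List.replicate_succ]; simp
    have hrep : List.replicate (n - k) (List.replicate (m + 1) (0 : Int))
        = List.replicate (m + 1) (0 : Int)
          :: List.replicate (n - (k + 1)) (List.replicate (m + 1) 0) := by
      have h : n - k = (n - (k + 1)) + 1 := by omega
      rw [h, List.replicate_succ]
    refine ⟨?_, ?_, rfl, rfl, by simp, by simp⟩
    · rw [hF, hrep, ← hzr]
    · rw [hV, hrep, ← hzr]
  have hfold := inner_fold Apy Bpy G_B n m k stB.1 stB.2 _ rs hFok hVok hFlen hVlen rfl
      (le_max_left _ _) stA h0 m le_rfl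
  obtain ⟨hF', hV', hfl', hvl', hfn', hvn'⟩ := hfold
  have hsimp : ∀ (P R : List (List Int)) (r : List Int),
      P ++ (r ++ List.replicate (m - m) 0) :: R = (P ++ [r]) ++ R := by
    intro P R r
    simp
  refine ⟨?_, ?_, by simp [hFlen], by simp [hVlen], ?_, ?_⟩
  · rw [hF', hsimp]
  · rw [hV', hsimp]
  · intro r hr
    rcases List.mem_append.mp hr with h | h
    · exact hFok r h
    · simp only [List.mem_singleton] at h; subst h; exact ⟨by omega, hfn'⟩
  · intro r hr
    rcases List.mem_append.mp hr with h | h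
    · exact hVok r h
    · simp only [List.mem_singleton] at h; subst h; exact ⟨by omega, hvn'⟩

lemma outer_fold (Apy Bpy G_A G_B : List Int) (n m : Nat)
    (stA0 : List (List Int) × List (List Int) × List (List Int))
    (stB0 : List (List Int) × List (List Int))
    (h0 : OuterRel n m stA0 stB0 0) :
    ∀ k : Nat, k ≤ n →
      OuterRel n m
        ((PySem.List.pyRange 1 ((k : Int) + 1)).foldl (stepA_i Apy Bpy G_A G_B (m : Int)) stA0)
        ((PySem.List.pyRange 1 ((k : Int) + 1)).foldl (stepB_i Apy Bpy G_A G_B (m : Int)) stB0) k := by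
  intro k
  induction k with
  | zero =>
    intro _
    rw [PySem.List.pyRange_one_eq_nil (by omega)]
    exact h0
  | succ k ih =>
    intro hkn
    have hcast : ((k + 1 : Nat) : Int) + 1 = ((k : Int) + 1) + 1 := by push_cast; ring
    rw [hcast, PySem.List.pyRange_one_succ_right (by omega), List.foldl_append,
        List.foldl_cons, List.foldl_nil, List.foldl_append, List.foldl_cons, List.foldl_nil]
    exact outer_step Apy Bpy G_A G_B n m k (by omega) _ _ (ih (by omega))

-- ===== VERDICT (by name: the statement is the Claim_ definition above) =====
theorem vglcs_optimized_spec : Claim_equal_vglcs_optimized := by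
  intro A B G_A G_B _ _
  unfold Spec_vglcs_optimized vglcs_optimized vglcs_optimized_alt
  simp only []
  have h0 : OuterRel A.length B.length
      (pvZeros (A.length + 1) (B.length + 1), pvZeros (A.length + 1) (B.length + 1),
       pvZeros (A.length + 1) (B.length + 1))
      ([List.replicate (B.length + 1) (0 : Int)], [List.replicate (B.length + 1) (0 : Int)]) 0 := by
    have hz : pvZeros (A.length + 1) (B.length + 1)
        = [List.replicate (B.length + 1) (0 : Int)]
          ++ List.replicate (A.length - 0) (List.replicate (B.length + 1) 0) := by
      unfold pvZeros
      rw [List.replicate_succ]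
      simp
    exact ⟨hz, hz, rfl, rfl,
      by intro r hr; simp only [List.mem_singleton] at hr; subst hr; exact ⟨by simp, by simp⟩,
      by intro r hr; simp only [List.mem_singleton] at hr; subst hr; exact ⟨by simp, by simp⟩⟩
  have h := outer_fold A B G_A G_B A.length B.length _ _ h0 A.length le_rfl
  obtain ⟨hF, hV, _, _, _, _⟩ := h
  rw [Nat.sub_self, List.replicate_zero, List.append_nil] at hF hV
  rw [hF, hV]
  rfl
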